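-- pv_equiv track=rewrite | github.com/PaddlePaddle/ERNIE | nlp-ernie/wenxin/data/tokenizer/tokenization_spm.py | inverse_index_str
-- ===== SOURCE A (Python) =====
-- def inverse_index_str(s):
--   """inverse the str of index"""
--   nth_tok = 0
--   position_to_nth = {}
--   for i, c in enumerate(s):
--       if c == " ":
--           nth_tok += 1
--       position_to_nth[i] = nth_tok
--   return position_to_nth
-- ===== SOURCE B (Python) =====
-- def _bisect_right(a, x):
--     lo, hi = 0, len(a)
--     while lo < hi:
--         mid = (lo + hi) // 2
--         if x < a[mid]:
--             hi = mid
--         else: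
--             lo = mid + 1
--     return lo
--
-- def inverse_index_str(s):
--     """Collect the sorted table of space positions once, then recover each
--     position's token index by binary search in that table."""
--     spaces = [i for i, c in enumerate(s) if c == " "]
--     return {i: _bisect_right(spaces, i) for i in range(len(s))}
-- ===== Notes on version B (the rewrite author's own statement) =====
-- stated objective: alternative
-- what changed: A's single pass with a running space counter is replaced by collecting the table of space positions once and recovering each position's token index by binary search (bisect_right) in that table.
import Mathlib
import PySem

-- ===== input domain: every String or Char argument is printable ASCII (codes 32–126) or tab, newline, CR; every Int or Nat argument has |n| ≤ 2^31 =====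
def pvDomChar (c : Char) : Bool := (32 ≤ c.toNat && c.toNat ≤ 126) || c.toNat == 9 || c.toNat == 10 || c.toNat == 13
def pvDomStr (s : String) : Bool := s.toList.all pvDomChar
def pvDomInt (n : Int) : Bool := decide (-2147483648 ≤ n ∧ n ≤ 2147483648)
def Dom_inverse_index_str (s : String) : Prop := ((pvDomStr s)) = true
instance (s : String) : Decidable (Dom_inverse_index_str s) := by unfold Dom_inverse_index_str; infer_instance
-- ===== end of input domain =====

-- B replaces A's running space counter by a table of space positions queried with binary search per index (alternative decomposition, not faster).


-- ===== PORT A =====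
def inverse_index_str (s : String) : List (Int × Int) :=
  (((PySem.List.enumerate s.toList 0).foldl
      (fun (st : Int × PySem.Dict Int Int) ic =>
        let nth := if ic.2 == ' ' then st.1 + 1 else st.1
        (nth, st.2.insert ic.1 nth))
      (0, PySem.Dict.empty)).2).items

-- ===== PORT B =====
-- hand port of Source B's _bisect_right while-loop; a[mid] is always in range (lo < hi ≤ len), so getD is exact
def bisectLoop (a : List Int) (x : Int) (lo hi : Nat) : Nat :=
  if _h : lo < hi then
    let mid := (lo + hi) / 2
    if x < a.getD mid 0 then bisectLoop a x lo mid else bisectLoop a x (mid + 1) hi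
  else lo
termination_by hi - lo
decreasing_by all_goals omega

def pyBisectRight (a : List Int) (x : Int) : Nat := bisectLoop a x 0 a.length

def inverse_index_str_alt (s : String) : List (Int × Int) :=
  let spaces := ((PySem.List.enumerate s.toList 0).filter (fun p => p.2 == ' ')).map (·.1)
  (PySem.List.pyRange 0 (s.toList.length : Int) 1).map (fun i => (i, (pyBisectRight spaces i : Int)))

-- ===== PRECONDITION & SPEC =====
def Spec_inverse_index_str (s : String) (out : List (Int × Int)) : Prop := out = inverse_index_str_alt s
instance (s : String) (out : List (Int × Int)) : Decidable (Spec_inverse_index_str s out) := by unfold Spec_inverse_index_str; infer_instance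

-- ===== CLAIM (what is proved, stated in full; the proofs are below) =====
def Claim_equal_inverse_index_str : Prop := ∀ (s : String), Dom_inverse_index_str s → Spec_inverse_index_str s (inverse_index_str s)

-- ===== LEMMAS AND PROOFS =====

theorem bisectLoop_char (a : List Int) (x : Int)
    (hs : a.Pairwise (· ≤ ·)) :
    ∀ n lo hi, hi - lo = n → lo ≤ hi → hi ≤ a.length →
    (∀ j (hj : j < a.length), j < lo → a[j] ≤ x) →
    (∀ j (hj : j < a.length), hi ≤ j → x < a[j]) →
    bisectLoop a x lo hi ≤ a.length ∧
      ∀ j (hj : j < a.length), (a[j] ≤ x ↔ j < bisectLoop a x lo hi) := by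
  have hmono : ∀ i j (hij : i ≤ j) (hj : j < a.length), a[i] ≤ a[j] := by
    intro i j hij hj
    rcases Nat.lt_or_ge i j with h | h
    · exact (List.pairwise_iff_getElem.mp hs) i j (by omega) hj h
    · have : i = j := by omega
      subst this; exact le_refl _
  intro n
  induction n using Nat.strong_induction_on with
  | _ n ih =>
    intro lo hi hn hle hhi hlo_le hhi_gt
    rw [bisectLoop]
    by_cases h : lo < hi
    · simp only [h, dif_pos]
      have hmidlt : (lo + hi) / 2 < hi := by omega
      have hmidge : lo ≤ (lo + hi) / 2 := by omega
      have hmlen : (lo + hi) / 2 < a.length := by omega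
      rw [List.getD_eq_getElem a 0 hmlen]
      by_cases hx : x < a[(lo + hi) / 2]
      · simp only [hx, if_pos]
        exact ih ((lo + hi) / 2 - lo) (by omega) lo ((lo + hi) / 2) rfl (by omega) (by omega)
          hlo_le
          (fun j hj hge => lt_of_lt_of_le hx (hmono _ j hge hj))
      · simp only [hx, if_neg, not_false_iff]
        have hax : a[(lo + hi) / 2] ≤ x := le_of_not_gt hx
        exact ih (hi - ((lo + hi) / 2 + 1)) (by omega) ((lo + hi) / 2 + 1) hi rfl (by omega) hhi
          (fun j hj hlt => le_trans (hmono j _ (by omega) hmlen) hax)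
          hhi_gt
    · simp only [h, dif_neg, not_false_iff]
      have : lo = hi := by omega
      subst this
      refine ⟨by omega, fun j hj => ⟨?_, fun hlt => hlo_le j hj hlt⟩⟩
      intro hax
      by_contra hge
      exact absurd hax (not_le.mpr (hhi_gt j hj (by omega)))

theorem countP_eq_of_iff (p : Int → Bool) :
    ∀ (a : List Int) (r : Nat), r ≤ a.length →
    (∀ j (hj : j < a.length), (p a[j] = true ↔ j < r)) →
    a.countP p = r := by
  intro a
  induction a with
  | nil => intro r hr _; simp at hr ⊢; omega
  | cons y t ihp =>
    intro r hr h
    cases r with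
    | zero =>
      have hy : ¬ p y = true := fun hp => by
        have := (h 0 (by simp)).mp (by simpa using hp); omega
      rw [List.countP_cons, if_neg hy]
      exact ihp 0 (by omega) (fun j hj => by
        have := h (j + 1) (by simpa using Nat.succ_lt_succ hj)
        simpa using this)
    | succ r' =>
      have hy : p y = true := (h 0 (by simp)).mpr (by omega)
      rw [List.countP_cons, if_pos hy]
      have : t.countP p = r' := ihp r' (by simp at hr; omega) (fun j hj => by
        have := h (j + 1) (by simpa using Nat.succ_lt_succ hj)
        simpa [Nat.succ_lt_succ_iff] using this)
      omega

-- spaces table for a char list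
def spacesOf (cs : List Char) : List Int :=
  ((PySem.List.enumerate cs 0).filter (fun p => p.2 == ' ')).map (·.1)

theorem spacesOf_sorted (cs : List Char) : (spacesOf cs).Pairwise (· ≤ ·) := by
  unfold spacesOf
  refine (List.pairwise_map.mpr ?_)
  refine ((PySem.List.pairwise_lt_enumerate cs 0).filter _).imp ?_
  intro p q h; exact le_of_lt h

theorem pyBisectRight_eq_countP (a : List Int) (hs : a.Pairwise (· ≤ ·)) (x : Int) :
    pyBisectRight a x = a.countP (fun v => v ≤ x) := by
  obtain ⟨hle, hiff⟩ := bisectLoop_char a x hs (a.length - 0) 0 a.length rfl (by omega) le_rfl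
    (fun j hj hlt => absurd hlt (by omega))
    (fun j hj hge => absurd hge (by omega))
  exact (countP_eq_of_iff _ a _ hle (fun j hj => by
    simpa using (hiff j hj))).symm

-- countP over the spaces table = spaces among the first k+1 chars
theorem countP_spacesOf (cs : List Char) (k : Nat) :
    (spacesOf cs).countP (fun v => v ≤ (k : Int)) =
      (cs.take (k + 1)).countP (fun c => c == ' ') := by
  unfold spacesOf
  rw [List.countP_map, List.countP_filter]
  simp only [Function.comp_def]
  have hsplit : cs = cs.take (k + 1) ++ cs.drop (k + 1) := (List.take_append_drop _ _).symm
  conv_lhs => rw [hsplit]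
  rw [PySem.List.enumerate_append, List.countP_append]
  have h1 : (PySem.List.enumerate (cs.take (k + 1)) 0).countP
      (fun p => decide (p.1 ≤ (k : Int)) && (p.2 == ' ')) =
      (PySem.List.enumerate (cs.take (k + 1)) 0).countP (fun p => p.2 == ' ') := by
    apply List.countP_congr
    intro p hp
    obtain ⟨j, hj, rfl⟩ := (PySem.List.mem_enumerate_iff _ _ _).mp hp
    have hjk : j < k + 1 := lt_of_lt_of_le hj (by simpa using List.length_take_le (k+1) cs)
    simp only [Function.comp]
    have hle : (0 : Int) + (j : Int) ≤ (k : Int) := by omega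
    rw [decide_eq_true hle, Bool.true_and]
  have h2 : (PySem.List.enumerate (cs.drop (k + 1)) (0 + (cs.take (k + 1)).length)).countP
      (fun p => decide (p.1 ≤ (k : Int)) && (p.2 == ' ')) = 0 := by
    apply List.countP_eq_zero.mpr
    intro p hp
    obtain ⟨j, hj, rfl⟩ := (PySem.List.mem_enumerate_iff _ _ _).mp hp
    have hdr : cs.drop (k + 1) ≠ [] := by
      intro hnil; rw [hnil] at hj; simp at hj
    have hlen : k + 1 ≤ cs.length := by
      by_contra hc
      exact hdr (List.drop_eq_nil_of_le (by omega))
    have htk : (cs.take (k + 1)).length = k + 1 := by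
      simp [List.length_take]; omega
    have hnot : ¬ ((0 : Int) + ((cs.take (k + 1)).length : Int) + (j : Int) ≤ (k : Int)) := by
      rw [htk]; push_cast; omega
    rw [decide_eq_false hnot, Bool.false_and]
    simp
  have h3 : (PySem.List.enumerate (cs.take (k + 1)) 0).countP (fun p => p.2 == ' ') =
      (cs.take (k + 1)).countP (fun c => c == ' ') := by
    conv_rhs => rw [← PySem.List.map_snd_enumerate (cs.take (k + 1)) 0]
    rw [List.countP_map]
    exact List.countP_congr (fun a _ => Iff.rfl)
  rw [h1, h2, Nat.add_zero, h3]

-- invariant for A's loop, by reverse induction over the char list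
theorem A_loop_inv (cs : List Char) :
    (let st := (PySem.List.enumerate cs 0).foldl
        (fun (st : Int × PySem.Dict Int Int) ic =>
          let nth := if ic.2 == ' ' then st.1 + 1 else st.1
          (nth, st.2.insert ic.1 nth))
        (0, PySem.Dict.empty)
     st.1 = (cs.countP (fun c => c == ' ') : Int) ∧
     st.2.items = (List.range cs.length).map
        (fun (k : Nat) => ((k : Int), ((cs.take (k + 1)).countP (fun c => c == ' ') : Int))) ∧
     ∀ a ∈ st.2.keys, a < (cs.length : Int)) := by
  induction cs using List.reverseRecOn with
  | nil => simp [PySem.List.enumerate, PySem.Dict.empty, PySem.Dict.keys]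
  | append_singleton xs x ih =>
    obtain ⟨h1, h2, h3⟩ := ih
    rw [PySem.List.enumerate_append]
    simp only [List.foldl_append]
    set st := (PySem.List.enumerate xs 0).foldl
        (fun (st : Int × PySem.Dict Int Int) ic =>
          let nth := if ic.2 == ' ' then st.1 + 1 else st.1
          (nth, st.2.insert ic.1 nth))
        (0, PySem.Dict.empty) with hst
    have hnotmem : st.2.contains (0 + (xs.length : Int)) = false := by
      rw [Bool.eq_false_iff]
      intro hc
      have := h3 _ ((PySem.Dict.contains_iff_mem_keys _ _).mp hc)
      omega
    simp only [PySem.List.enumerate, List.foldl_cons, List.foldl_nil]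
    refine ⟨?_, ?_, ?_⟩
    · simp only [h1, List.countP_append, List.countP_cons, List.countP_nil]
      by_cases hx : x == ' ' <;> simp [hx]
    · rw [PySem.Dict.items_insert_of_not_contains _ _ hnotmem, h2]
      rw [List.length_append, List.length_singleton, List.range_succ, List.map_append]
      congr 1
      · apply List.map_congr_left
        intro k hk
        have hk' : k < xs.length := List.mem_range.mp hk
        rw [List.take_append_of_le_length (by omega)]
      · simp only [List.map_cons, List.map_nil]
        have htake : (xs ++ [x]).take (xs.length + 1) = xs ++ [x] :=
          List.take_of_length_le (by simp)
        rw [htake]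
        have : ((0 : Int) + (xs.length : Int)) = ((xs.length : Int)) := by omega
        rw [this, h1]
        by_cases hx : x == ' ' <;>
          simp [hx, List.countP_append, List.countP_nil]
    · intro a ha
      rcases (PySem.Dict.mem_keys_insert _ _ _ _).mp ha with h | h
      · subst h
        have hl : (xs ++ [x]).length = xs.length + 1 := by simp
        rw [hl]; push_cast; omega
      · have := h3 a h
        have hl : (xs ++ [x]).length = xs.length + 1 := by simp
        rw [hl]; push_cast; omega

-- ===== VERDICT (by name: the statement is the Claim_ definition above) =====
theorem inverse_index_str_spec : Claim_equal_inverse_index_str := by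
  intro s _
  unfold Spec_inverse_index_str inverse_index_str inverse_index_str_alt
  obtain ⟨h1, h2, h3⟩ := A_loop_inv s.toList
  rw [h2]
  rw [PySem.List.pyRange_one]
  simp only [Int.sub_zero, Int.toNat_natCast, List.map_map]
  apply List.map_congr_left
  intro k hk
  have hk' : k < s.toList.length := List.mem_range.mp hk
  simp only [Function.comp]
  have hz : ((0 : Int) + (k : Int)) = ((k : Int)) := by omega
  rw [hz]
  congr 1
  rw [show ((PySem.List.enumerate s.toList 0).filter (fun p => p.2 == ' ')).map (·.1)
      = spacesOf s.toList from rfl]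
  rw [pyBisectRight_eq_countP _ (spacesOf_sorted _), countP_spacesOf]
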